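-- pv_equiv track=rewrite | github.com/gdgpce/DSA-Challenges-2024 | Stack/Deletion-String-Compare/solution.py | string_compare
-- ===== SOURCE A (Python) =====
-- def string_compare(s, t):
--     str1=[]
--     str2=[]
--
--     for chara in s:
--         if chara =='#':
--             if len(str1)!=0:
--                 str1.pop()
--         else:
--             str1.append(chara)
--
--     for chara in t:
--         if chara=='#':
--             if len(str2)!=0:
--                 str2.pop()
--         else:
--             str2.append(chara)
--     return str1==str2
-- ===== SOURCE B (Python) =====
-- def string_compare(s, t):
--     def survivors(u):
--         out = []
--         skip = 0
--         for c in reversed(u):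
--             if c == '#':
--                 skip += 1
--             elif skip:
--                 skip -= 1
--             else:
--                 out.append(c)
--         return out
--     return survivors(s) == survivors(t)
-- ===== Notes on version B (the rewrite author's own statement) =====
-- stated objective: alternative
-- what changed: Replaces the two forward stack simulations (push each char, pop on '#') by a single-pass reverse scan per string with a pending-backspace counter that emits only the surviving characters (in reverse), then compares those lists.
import Mathlib
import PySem

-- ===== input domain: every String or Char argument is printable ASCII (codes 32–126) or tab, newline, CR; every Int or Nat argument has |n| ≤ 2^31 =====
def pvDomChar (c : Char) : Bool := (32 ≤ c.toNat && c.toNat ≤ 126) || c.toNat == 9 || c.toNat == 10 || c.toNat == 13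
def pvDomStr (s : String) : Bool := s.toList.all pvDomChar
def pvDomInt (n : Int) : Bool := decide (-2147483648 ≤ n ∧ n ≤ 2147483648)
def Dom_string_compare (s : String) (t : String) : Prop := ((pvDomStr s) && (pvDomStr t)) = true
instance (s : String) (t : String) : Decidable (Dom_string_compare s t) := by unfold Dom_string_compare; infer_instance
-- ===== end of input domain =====

-- B replaces A's two forward stack simulations by a reverse scan per string with a
-- pending-backspace counter emitting the surviving characters (alternative algorithm, same cost).


-- ===== PORT A =====
-- for chara in u: '#' pops the last element when nonempty, else append chara
def pvStackStep (st : List Char) (c : Char) : List Char :=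
  if c = '#' then (if st.length ≠ 0 then st.dropLast else st) else st ++ [c]

def string_compare (s : String) (t : String) : Bool :=
  let str1 := s.toList.foldl pvStackStep []
  let str2 := t.toList.foldl pvStackStep []
  str1 == str2

-- ===== PORT B =====
-- reverse scan: '#' increments skip, a char is skipped while skip ≠ 0, else appended to out
def pvSurvStep (st : List Char × Int) (c : Char) : List Char × Int :=
  if c = '#' then (st.1, st.2 + 1)
  else if st.2 ≠ 0 then (st.1, st.2 - 1)
  else (st.1 ++ [c], st.2)

def pvSurvivors (u : String) : List Char :=
  (u.toList.reverse.foldl pvSurvStep ([], 0)).1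

def string_compare_alt (s : String) (t : String) : Bool :=
  pvSurvivors s == pvSurvivors t

-- ===== PRECONDITION & SPEC =====
def Spec_string_compare (s : String) (t : String) (out : Bool) : Prop := out = string_compare_alt s t
instance (s : String) (t : String) (out : Bool) : Decidable (Spec_string_compare s t out) := by unfold Spec_string_compare; infer_instance

-- ===== CLAIM (what is proved, stated in full; the proofs are below) =====
def Claim_equal_string_compare : Prop := ∀ (s : String) (t : String), Dom_string_compare s t → Spec_string_compare s t (string_compare s t)

-- ===== LEMMAS AND PROOFS =====

-- the out component only accumulates
theorem pvSurv_out_acc (l : List Char) (out : List Char) (k : Int) :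
    (l.foldl pvSurvStep (out, k)).1 = out ++ (l.foldl pvSurvStep ([], k)).1 := by
  induction l generalizing out k with
  | nil => simp
  | cons c l ih =>
    simp only [List.foldl_cons, pvSurvStep]
    split_ifs with h1 h2
    · exact ih out (k + 1)
    · exact ih out (k - 1)
    · rw [ih (out ++ [c]) k, ih ([] ++ [c]) k]; simp

-- core invariant: reverse scan with pending counter k yields the stack minus its top k, reversed
theorem pvSurv_eq_stack (cs : List Char) (k : Int) (hk : 0 ≤ k) :
    (cs.reverse.foldl pvSurvStep ([], k)).1 =
      (((cs.foldl pvStackStep []).take ((cs.foldl pvStackStep []).length - k.toNat)).reverse) := by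
  induction cs using List.reverseRecOn generalizing k with
  | nil => simp
  | append_singleton cs c ih =>
    rw [List.reverse_append, List.reverse_singleton, List.singleton_append, List.foldl_cons,
      List.foldl_append, List.foldl_cons, List.foldl_nil]
    set stk := cs.foldl pvStackStep [] with hstk
    by_cases hc : c = '#'
    · -- '#': pending counter grows by one; stack drops its last element
      rw [show pvSurvStep ([], k) c = ([], k + 1) from by simp [pvSurvStep, hc]]
      rw [ih (k + 1) (by omega)]
      have hdrop : ∀ st : List Char, pvStackStep st '#' = st.dropLast := by
        intro st; cases st <;> simp [pvStackStep]
      rw [hc, hdrop stk, List.length_dropLast, List.dropLast_eq_take, List.take_take]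
      congr 2
      omega
    · have hpush : pvStackStep stk c = stk ++ [c] := by unfold pvStackStep; simp [hc]
      by_cases hk0 : k = 0
      · -- counter exhausted: c survives
        rw [show pvSurvStep ([], k) c = ([] ++ [c], k) from by simp [pvSurvStep, hc, hk0]]
        rw [pvSurv_out_acc, ih k hk, hpush, hk0]
        rw [List.take_of_length_le (by simp), List.take_of_length_le (by simp)]
        simp
      · -- counter positive: c is consumed
        rw [show pvSurvStep ([], k) c = ([], k - 1) from by simp [pvSurvStep, hc, hk0]]
        rw [ih (k - 1) (by omega), hpush]
        rw [List.take_append_of_le_length (by simp; omega)]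
        congr 2
        simp
        omega

theorem pvSurvivors_eq (u : String) :
    pvSurvivors u = (u.toList.foldl pvStackStep []).reverse := by
  unfold pvSurvivors
  rw [pvSurv_eq_stack u.toList 0 le_rfl]
  simp

-- ===== VERDICT (by name: the statement is the Claim_ definition above) =====
theorem string_compare_spec : Claim_equal_string_compare := by
  intro s t _
  unfold Spec_string_compare string_compare string_compare_alt
  rw [pvSurvivors_eq, pvSurvivors_eq]
  simp
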